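-- pv_equiv track=rewrite | github.com/GalyaBorislavova/SoftUni_Python_Advanced_May_2021 | 2_Tuples_and_sets/05. SoftUni Party.py | separated_onto_vip_and_regular
-- ===== SOURCE A (Python) =====
-- def is_vip_guest(guest):
--     return guest[0].isdigit()
--
-- def separated_onto_vip_and_regular(guests):
--     vip = []
--     regular = []
--     for guest in guests:
--         if is_vip_guest(guest):
--             vip.append(guest)
--         else:
--             regular.append(guest)
--     return sorted(vip), sorted(regular)
-- ===== SOURCE B (Python) =====
-- def is_vip_guest(guest):
--     return guest[0].isdigit()
--
-- def separated_onto_vip_and_regular(guests):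
--     ordered = sorted(guests)
--     vip = [g for g in ordered if is_vip_guest(g)]
--     regular = [g for g in ordered if not is_vip_guest(g)]
--     return vip, regular
-- ===== Notes on version B (the rewrite author's own statement) =====
-- stated objective: alternative
-- what changed: B sorts the whole guest list once and then splits the already-sorted list into vip/regular with two filtering passes, instead of A's partition-first-then-sort-each-half; filtering a sorted list keeps each half sorted.
import Mathlib
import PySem

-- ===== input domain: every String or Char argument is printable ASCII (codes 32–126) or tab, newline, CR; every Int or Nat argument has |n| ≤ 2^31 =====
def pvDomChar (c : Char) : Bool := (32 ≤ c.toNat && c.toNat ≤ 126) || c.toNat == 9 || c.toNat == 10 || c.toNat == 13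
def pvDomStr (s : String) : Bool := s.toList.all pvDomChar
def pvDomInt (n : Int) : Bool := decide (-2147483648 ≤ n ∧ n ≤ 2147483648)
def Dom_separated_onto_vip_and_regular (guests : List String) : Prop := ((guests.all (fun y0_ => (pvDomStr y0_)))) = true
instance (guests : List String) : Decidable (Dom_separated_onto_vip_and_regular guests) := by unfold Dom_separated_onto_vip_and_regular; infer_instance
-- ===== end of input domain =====

-- B sorts the guest list once and splits the sorted list into vip/regular by two filter
-- passes (instead of A's partition-then-sort-each); same O(n log n) cost, different decomposition.


-- ===== PORT A =====
-- guest[0].isdigit(); on an empty string Python raises IndexError (pyGet? = none), excluded by Pre_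
def is_vip_guest (guest : String) : Bool :=
  match PySem.Str.pyGet? guest 0 with
  | some c => PySem.Chars.isdigit c
  | none   => false

def separated_onto_vip_and_regular (guests : List String) : List String × List String :=
  let vr := guests.foldl
    (fun (acc : List String × List String) guest =>
      if is_vip_guest guest then (acc.1 ++ [guest], acc.2) else (acc.1, acc.2 ++ [guest]))
    ([], [])
  (PySem.List.sorted vr.1 (fun x => x) false, PySem.List.sorted vr.2 (fun x => x) false)

-- ===== PORT B =====
def is_vip_guest_alt (guest : String) : Bool :=
  match PySem.Str.pyGet? guest 0 with
  | some c => PySem.Chars.isdigit c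
  | none   => false

def separated_onto_vip_and_regular_alt (guests : List String) : List String × List String :=
  let ordered := PySem.List.sorted guests (fun x => x) false
  (ordered.filter (fun g => is_vip_guest_alt g),
   ordered.filter (fun g => !is_vip_guest_alt g))

-- ===== PRECONDITION & SPEC =====
-- Pre_ excludes lists containing an empty string: there A (and B) raise IndexError on guest[0].
def Pre_separated_onto_vip_and_regular (guests : List String) : Prop :=
  ∀ g ∈ guests, g ≠ ""
instance (guests : List String) : Decidable (Pre_separated_onto_vip_and_regular guests) := by
  unfold Pre_separated_onto_vip_and_regular; infer_instance
def pvWitness_separated_onto_vip_and_regular : List String := ["5Peter", "anna", "1x", "Bob"]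

def Spec_separated_onto_vip_and_regular (guests : List String) (out : List String × List String) : Prop := out = separated_onto_vip_and_regular_alt guests
instance (guests : List String) (out : List String × List String) : Decidable (Spec_separated_onto_vip_and_regular guests out) := by unfold Spec_separated_onto_vip_and_regular; infer_instance

-- ===== CLAIM (what is proved, stated in full; the proofs are below) =====
def Claim_equal_separated_onto_vip_and_regular : Prop := ∀ (guests : List String), Dom_separated_onto_vip_and_regular guests → Pre_separated_onto_vip_and_regular guests → Spec_separated_onto_vip_and_regular guests (separated_onto_vip_and_regular guests)

-- ===== LEMMAS AND PROOFS =====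

-- the two predicates are the same function
theorem vip_pred_eq : is_vip_guest = is_vip_guest_alt := rfl

-- A's loop partitions: the accumulator ends as (filter p, filter !p)
theorem foldl_partition (guests : List String) (v r : List String) :
    guests.foldl
      (fun (acc : List String × List String) guest =>
        if is_vip_guest guest then (acc.1 ++ [guest], acc.2) else (acc.1, acc.2 ++ [guest]))
      (v, r)
    = (v ++ guests.filter (fun g => is_vip_guest g),
       r ++ guests.filter (fun g => !is_vip_guest g)) := by
  induction guests generalizing v r with
  | nil => simp
  | cons g gs ih =>
    by_cases h : is_vip_guest g <;> simp [h, ih, List.append_assoc]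

-- sorting a filtered list = filtering the sorted list (strings: equal keys are equal elements)
theorem sorted_filter (guests : List String) (p : String → Bool) :
    PySem.List.sorted (guests.filter p) (fun x => x) false
      = (PySem.List.sorted guests (fun x => x) false).filter p := by
  apply PySem.List.sorted_id_eq_of_perm_of_pairwise
  · exact (PySem.List.sorted_perm guests (fun x => x) false).filter p
  · exact (PySem.List.sorted_pairwise guests (fun x => x)).filter p

-- ===== VERDICT (by name: the statement is the Claim_ definition above) =====
theorem separated_onto_vip_and_regular_spec : Claim_equal_separated_onto_vip_and_regular := by
  intro guests _ _
  unfold Spec_separated_onto_vip_and_regular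
  unfold separated_onto_vip_and_regular separated_onto_vip_and_regular_alt
  rw [foldl_partition]
  simp only [← vip_pred_eq]
  rw [Prod.mk.injEq]
  constructor <;> simpa using sorted_filter guests _
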